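-- pv_equiv track=rewrite | github.com/Ivanmartinez22/Projects-Listed-On-Resume | CacheProject/small_tester.py | cache_range_find
-- ===== SOURCE A (Python) =====
-- def cache_range_find(address):
--     address_int = int(address, 16)
--     if(address_int == 0):
--         return [0,8]
--     if(address_int % 8 == 0):
--         return [address_int,address_int+8]
--     while(address_int % 8 != 0):
--         address_int += 1
--     end_num = address_int
--     start_num = end_num - 8
--     return_list = [start_num,end_num]
--     return return_list
-- ===== SOURCE B (Python) =====
-- def cache_range_find(address):
--     start = (int(address, 16) // 8) * 8
--     return [start, start + 8]
-- ===== Notes on version B (the rewrite author's own statement) =====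
-- stated objective: simpler
-- what changed: Replaces the zero special case, the multiple-of-8 branch and the round-up-then-subtract while loop by one closed-form floor-division expression start = (a//8)*8.
import Mathlib
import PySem

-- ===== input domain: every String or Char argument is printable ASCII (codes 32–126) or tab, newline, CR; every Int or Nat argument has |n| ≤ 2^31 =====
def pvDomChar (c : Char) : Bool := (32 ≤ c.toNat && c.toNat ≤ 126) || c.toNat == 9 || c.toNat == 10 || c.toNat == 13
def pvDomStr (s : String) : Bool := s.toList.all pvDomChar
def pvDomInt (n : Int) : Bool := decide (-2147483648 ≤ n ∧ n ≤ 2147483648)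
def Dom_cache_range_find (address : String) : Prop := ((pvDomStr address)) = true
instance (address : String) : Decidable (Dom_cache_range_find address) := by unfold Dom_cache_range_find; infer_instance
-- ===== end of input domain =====

-- B replaces A's zero special case, multiple-of-8 branch and round-up while loop
-- by the single closed form start = (a // 8) * 8; objective: simpler.


-- ===== PORT A =====
-- while(address_int % 8 != 0): address_int += 1   (fuel 8 only makes the loop total:
-- when the guard holds, at most 7 increments reach the next multiple of 8)
def cacheLoopA : Nat -> Int -> Int
  | 0, a => a
  | fuel + 1, a => if PySem.Int.mod a 8 ≠ 0 then cacheLoopA fuel (a + 1) else a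

def cache_range_find (address : String) : List Int :=
  match PySem.Int.ofStrBase? address 16 with
  | none => []  -- int(address, 16) raises ValueError; excluded by Pre_
  | some address_int =>
    if address_int = 0 then [0, 8]
    else if PySem.Int.mod address_int 8 = 0 then [address_int, address_int + 8]
    else
      let end_num := cacheLoopA 8 address_int
      let start_num := end_num - 8
      [start_num, end_num]

-- ===== PORT B =====
def cache_range_find_alt (address : String) : List Int :=
  match PySem.Int.ofStrBase? address 16 with
  | none => []  -- int(address, 16) raises ValueError; excluded by Pre_
  | some a =>
    let start := PySem.Int.floordiv a 8 * 8
    [start, start + 8]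

-- ===== PRECONDITION & SPEC =====
-- A raises ValueError when address is not a valid base-16 integer literal; excluded.
def Pre_cache_range_find (address : String) : Prop :=
  (PySem.Int.ofStrBase? address 16).isSome
instance (address : String) : Decidable (Pre_cache_range_find address) := by
  unfold Pre_cache_range_find; infer_instance
def pvWitness_cache_range_find : String := "ff"

def Spec_cache_range_find (address : String) (out : List Int) : Prop := out = cache_range_find_alt address
instance (address : String) (out : List Int) : Decidable (Spec_cache_range_find address out) := by unfold Spec_cache_range_find; infer_instance

-- ===== CLAIM (what is proved, stated in full; the proofs are below) =====
def Claim_equal_cache_range_find : Prop := ∀ (address : String), Dom_cache_range_find address → Pre_cache_range_find address → Spec_cache_range_find address (cache_range_find address)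

-- ===== LEMMAS AND PROOFS =====
theorem cacheLoopA_eq (fuel : Nat) (a : Int) (h : a % 8 ≠ 0)
    (hk : (8 - a % 8).toNat ≤ fuel) : cacheLoopA fuel a = a + (8 - a % 8) := by
  induction fuel generalizing a with
  | zero =>
    exfalso
    have h1 : 0 ≤ a % 8 := Int.emod_nonneg _ (by omega)
    have h2 : a % 8 < 8 := Int.emod_lt_of_pos _ (by omega)
    omega
  | succ fuel ih =>
    have hmod : PySem.Int.mod a 8 = a % 8 :=
      PySem.Int.mod_eq_emod_of_pos (by omega)
    rw [cacheLoopA, hmod, if_pos h]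
    have key : (a + 1) % 8 = (a % 8 + 1) % 8 := by rw [Int.add_emod]; norm_num
    have h1 : 0 ≤ a % 8 := Int.emod_nonneg _ (by omega)
    have h2 : a % 8 < 8 := Int.emod_lt_of_pos _ (by omega)
    by_cases h7 : a % 8 = 7
    · have hz : (a + 1) % 8 = 0 := by omega
      cases fuel with
      | zero => simp [cacheLoopA]; omega
      | succ m =>
        rw [cacheLoopA, PySem.Int.mod_eq_emod_of_pos (by omega), hz]
        simp
        omega
    · have hnz : (a + 1) % 8 ≠ 0 := by omega
      rw [ih (a + 1) hnz (by omega)]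
      omega

-- ===== VERDICT (by name: the statement is the Claim_ definition above) =====
theorem cache_range_find_spec : Claim_equal_cache_range_find := by
  intro address _ hpre
  unfold Spec_cache_range_find cache_range_find cache_range_find_alt
  unfold Pre_cache_range_find at hpre
  cases hv : PySem.Int.ofStrBase? address 16 with
  | none => simp [hv] at hpre
  | some a =>
    dsimp only
    have hm := PySem.Int.mod_eq_emod_of_pos (b := 8) (by omega) (a := a)
    have hfd := PySem.Int.floordiv_eq_ediv_of_pos (b := 8) (by omega) (a := a)
    have hdm : PySem.Int.floordiv a 8 * 8 = a - a % 8 := by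
      rw [hfd]; have := Int.emod_add_mul_ediv a 8; omega
    by_cases h0 : a = 0
    · rw [if_pos h0]
      rw [h0] at hdm
      simp only [List.cons.injEq, and_true]
      constructor <;> omega
    · rw [if_neg h0]
      by_cases h8 : PySem.Int.mod a 8 = 0
      · rw [if_pos h8]
        rw [hm] at h8
        simp only [List.cons.injEq, and_true]
        constructor <;> omega
      · rw [if_neg h8]
        rw [hm] at h8
        have h1 : 0 ≤ a % 8 := Int.emod_nonneg _ (by omega)
        have h2 : a % 8 < 8 := Int.emod_lt_of_pos _ (by omega)
        rw [cacheLoopA_eq 8 a h8 (by omega)]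
        simp only [List.cons.injEq, and_true]
        constructor <;> omega
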